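-- pv_equiv track=rewrite | github.com/swe-students-spring2026/3-package-giant_anteater | addition_tutor/addition.py | add_step_by_step
-- ===== SOURCE A (Python) =====
-- def align_numbers(a: int, b: int, fill: int = 0):
--     """Aligns two integers by digits, padding the shorter number with `fill`."""
--     a_digits = [int(d) for d in str(a)]
--     b_digits = [int(d) for d in str(b)]
--     max_len = max(len(a_digits), len(b_digits))
--     a_digits = [fill]*(max_len - len(a_digits)) + a_digits
--     b_digits = [fill]*(max_len - len(b_digits)) + b_digits
--     return [a_digits, b_digits]
--
-- def calculate_carry(a_digits, b_digits, base: int = 10):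
--     """Calculates carry for column addition."""
--     carry = 0
--     carry_list = []
--     for ad, bd in zip(reversed(a_digits), reversed(b_digits)):
--         total = ad + bd + carry
--         carry = total // base
--         carry_list.append(carry)
--     return list(reversed(carry_list))
--
-- def add_step_by_step(a: int, b: int, show_carry: bool = True):
--     """Adds two integers step-by-step, showing digits, carry, and result."""
--     a_digits, b_digits = align_numbers(a, b)
--     carry = calculate_carry(a_digits, b_digits) if show_carry else [0]*len(a_digits)
--     result_digits = []
--     c = 0
--     for ad, bd, cv in zip(reversed(a_digits), reversed(b_digits), reversed(carry)):
--         s = ad + bd + c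
--         result_digits.append(s % 10)
--         c = s // 10
--     if c > 0:
--         result_digits.append(c)
--     result_digits.reverse()
--     return {
--         "a_digits": a_digits,
--         "b_digits": b_digits,
--         "carry": carry,
--         "result": result_digits
--     }
-- ===== SOURCE B (Python) =====
-- def add_step_by_step(a: int, b: int, show_carry: bool = True):
--     """Adds two integers step-by-step, showing digits, carry, and result.
--     Single right-to-left pass computing result and carries together."""
--     a_digits = [int(d) for d in str(a)]
--     b_digits = [int(d) for d in str(b)]
--     n = max(len(a_digits), len(b_digits))
--     a_digits = [0] * (n - len(a_digits)) + a_digits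
--     b_digits = [0] * (n - len(b_digits)) + b_digits
--     res_rev = []
--     carry_rev = []
--     c = 0
--     for ad, bd in zip(reversed(a_digits), reversed(b_digits)):
--         t = ad + bd + c
--         c = t // 10
--         res_rev.append(t % 10)
--         carry_rev.append(c)
--     if c > 0:
--         res_rev.append(c)
--     return {
--         "a_digits": a_digits,
--         "b_digits": b_digits,
--         "carry": carry_rev[::-1] if show_carry else [0] * n,
--         "result": res_rev[::-1],
--     }
-- ===== Notes on version B (the rewrite author's own statement) =====
-- stated objective: simpler
-- what changed: Inlined the alignment and fused A's separate carry-computation pass and result pass into one right-to-left loop that maintains a single carry and collects result digits and carry-outs together; the two helper functions disappear.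
import Mathlib
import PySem

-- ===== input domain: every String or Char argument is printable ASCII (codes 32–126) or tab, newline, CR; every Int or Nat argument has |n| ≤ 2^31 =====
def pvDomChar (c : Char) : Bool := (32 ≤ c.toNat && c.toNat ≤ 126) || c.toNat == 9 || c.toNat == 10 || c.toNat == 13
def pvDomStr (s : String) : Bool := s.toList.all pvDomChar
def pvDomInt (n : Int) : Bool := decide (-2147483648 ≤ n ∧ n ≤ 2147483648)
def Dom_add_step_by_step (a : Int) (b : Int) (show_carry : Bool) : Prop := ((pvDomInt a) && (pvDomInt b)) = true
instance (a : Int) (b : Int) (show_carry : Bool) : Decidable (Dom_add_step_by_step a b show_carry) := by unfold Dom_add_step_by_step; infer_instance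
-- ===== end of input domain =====

-- B fuses A's carry pass and result pass into one right-to-left loop (simpler decomposition, no helpers).
-- Equivalence of the RETURN value is proved for non-negative a, b (Pre_); on negatives both Pythons raise ValueError.

-- ===== PORT A =====
-- '[int(d) for d in str(n)]' — shared by both Pythons verbatim; int(d) on a non-digit char raises
-- (excluded by Pre_), here defaulted via getD 0, reached only outside Pre_.
def pvDigits (n : Int) : List Int :=
  (PySem.Int.toStr n).toList.map (fun c => (PySem.Int.ofStr? c.toString).getD 0)

-- align_numbers returns the Python two-element list [a_digits, b_digits] as a pair (unpacked by the caller; exact)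
def align_numbers (a : Int) (b : Int) (fill : Int) : List Int × List Int :=
  let a_digits := pvDigits a
  let b_digits := pvDigits b
  let max_len := max a_digits.length b_digits.length
  let a_digits := List.replicate (max_len - a_digits.length) fill ++ a_digits
  let b_digits := List.replicate (max_len - b_digits.length) fill ++ b_digits
  (a_digits, b_digits)

def calculate_carry (a_digits b_digits : List Int) (base : Int) : List Int :=
  let st := (a_digits.reverse.zip b_digits.reverse).foldl
    (fun (st : Int × List Int) p =>
      let total := p.1 + p.2 + st.1
      let carry := PySem.Int.floordiv total base
      (carry, st.2 ++ [carry])) (0, [])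
  st.2.reverse

def add_step_by_step (a : Int) (b : Int) (show_carry : Bool) : List (String × List Int) :=
  let ab := align_numbers a b 0
  let a_digits := ab.1
  let b_digits := ab.2
  let carry := if show_carry then calculate_carry a_digits b_digits 10
               else List.replicate a_digits.length (0 : Int)
  -- zip(reversed(a_digits), reversed(b_digits), reversed(carry)) as nested zip; state (result_digits, c)
  let st := (a_digits.reverse.zip (b_digits.reverse.zip carry.reverse)).foldl
    (fun (st : List Int × Int) p =>
      let s := p.1 + p.2.1 + st.2
      (st.1 ++ [PySem.Int.mod s 10], PySem.Int.floordiv s 10)) ([], 0)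
  let result_digits := if st.2 > 0 then st.1 ++ [st.2] else st.1
  [("a_digits", a_digits), ("b_digits", b_digits), ("carry", carry),
   ("result", result_digits.reverse)]

-- ===== PORT B =====
def add_step_by_step_alt (a : Int) (b : Int) (show_carry : Bool) : List (String × List Int) :=
  let a0 := pvDigits a
  let b0 := pvDigits b
  let n := max a0.length b0.length
  let a_digits := List.replicate (n - a0.length) (0 : Int) ++ a0
  let b_digits := List.replicate (n - b0.length) (0 : Int) ++ b0
  -- single pass: state (res_rev, carry_rev, c)
  let st := (a_digits.reverse.zip b_digits.reverse).foldl
    (fun (st : List Int × List Int × Int) p =>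
      let t := p.1 + p.2 + st.2.2
      let c := PySem.Int.floordiv t 10
      (st.1 ++ [PySem.Int.mod t 10], st.2.1 ++ [c], c)) ([], [], 0)
  let res_rev := if st.2.2 > 0 then st.1 ++ [st.2.2] else st.1
  [("a_digits", a_digits), ("b_digits", b_digits),
   ("carry", if show_carry then st.2.1.reverse else List.replicate n (0 : Int)),
   ("result", res_rev.reverse)]

-- ===== PRECONDITION & SPEC =====
-- Pre_ excludes negative a or b: there str() yields a leading '-' and int('-') raises ValueError in both A and B.
def Pre_add_step_by_step (a : Int) (b : Int) (show_carry : Bool) : Prop := 0 ≤ a ∧ 0 ≤ b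
instance (a : Int) (b : Int) (show_carry : Bool) : Decidable (Pre_add_step_by_step a b show_carry) := by unfold Pre_add_step_by_step; infer_instance
def pvWitness_add_step_by_step : Int × Int × Bool := (178, 95, true)

def Spec_add_step_by_step (a : Int) (b : Int) (show_carry : Bool) (out : List (String × List Int)) : Prop := out = add_step_by_step_alt a b show_carry
instance (a : Int) (b : Int) (show_carry : Bool) (out : List (String × List Int)) : Decidable (Spec_add_step_by_step a b show_carry out) := by unfold Spec_add_step_by_step; infer_instance

-- ===== CLAIM (what is proved, stated in full; the proofs are below) =====
def Claim_equal_add_step_by_step : Prop := ∀ (a : Int) (b : Int) (show_carry : Bool), Dom_add_step_by_step a b show_carry → Pre_add_step_by_step a b show_carry → Spec_add_step_by_step a b show_carry (add_step_by_step a b show_carry)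

-- ===== LEMMAS AND PROOFS =====

-- step functions (definitionally equal to the lambdas inside the ports)
def pvCarStep (st : Int × List Int) (p : Int × Int) : Int × List Int :=
  (PySem.Int.floordiv (p.1 + p.2 + st.1) 10, st.2 ++ [PySem.Int.floordiv (p.1 + p.2 + st.1) 10])
def pvResStep (st : List Int × Int) (p : Int × Int) : List Int × Int :=
  (st.1 ++ [PySem.Int.mod (p.1 + p.2 + st.2) 10], PySem.Int.floordiv (p.1 + p.2 + st.2) 10)
def pvResStep3 (st : List Int × Int) (p : Int × (Int × Int)) : List Int × Int :=
  (st.1 ++ [PySem.Int.mod (p.1 + p.2.1 + st.2) 10], PySem.Int.floordiv (p.1 + p.2.1 + st.2) 10)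
def pvBStep (st : List Int × List Int × Int) (p : Int × Int) : List Int × List Int × Int :=
  (st.1 ++ [PySem.Int.mod (p.1 + p.2 + st.2.2) 10],
   st.2.1 ++ [PySem.Int.floordiv (p.1 + p.2 + st.2.2) 10],
   PySem.Int.floordiv (p.1 + p.2 + st.2.2) 10)

-- let-free mirrors of the two ports (definitionally equal; connected by rfl in pv_main)
def pvCarryA (ad bd : List Int) (sc : Bool) : List Int :=
  if sc then ((ad.reverse.zip bd.reverse).foldl pvCarStep (0, [])).2.reverse
  else List.replicate ad.length (0 : Int)
def pvFin (st : List Int × Int) : List Int := if st.2 > 0 then st.1 ++ [st.2] else st.1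
def pvFinB (st : List Int × List Int × Int) : List Int :=
  if st.2.2 > 0 then st.1 ++ [st.2.2] else st.1
def pvOutA (ad bd : List Int) (sc : Bool) : List (String × List Int) :=
  [("a_digits", ad), ("b_digits", bd), ("carry", pvCarryA ad bd sc),
   ("result", (pvFin ((ad.reverse.zip (bd.reverse.zip (pvCarryA ad bd sc).reverse)).foldl
      pvResStep3 ([], 0))).reverse)]
def pvOutB (ad bd : List Int) (n : Nat) (sc : Bool) : List (String × List Int) :=
  [("a_digits", ad), ("b_digits", bd),
   ("carry", if sc then ((ad.reverse.zip bd.reverse).foldl pvBStep ([], [], 0)).2.1.reverse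
             else List.replicate n (0 : Int)),
   ("result", (pvFinB ((ad.reverse.zip bd.reverse).foldl pvBStep ([], [], 0))).reverse)]

-- B's fused fold decomposes into A's carry fold and A's result fold
lemma pvB_decomp (l : List (Int × Int)) : ∀ (r k : List Int) (c : Int),
    l.foldl pvBStep (r, k, c) =
      ((l.foldl pvResStep (r, c)).1, (l.foldl pvCarStep (c, k)).2, (l.foldl pvResStep (r, c)).2) := by
  induction l with
  | nil => intro r k c; rfl
  | cons p t ih => intro r k c; simp only [List.foldl_cons, pvBStep, pvResStep, pvCarStep]; exact ih _ _ _

lemma pvCar_len (l : List (Int × Int)) : ∀ (c : Int) (k : List Int),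
    (l.foldl pvCarStep (c, k)).2.length = k.length + l.length := by
  induction l with
  | nil => intro c k; simp
  | cons p t ih =>
    intro c k
    simp only [List.foldl_cons, pvCarStep]
    rw [ih]
    simp only [List.length_append, List.length_cons, List.length_nil]
    omega

-- projecting away the third zip component when it is long enough
lemma pvZip_proj (xs : List Int) : ∀ (ys zs : List Int), ys.length ≤ zs.length →
    (xs.zip (ys.zip zs)).map (fun p => (p.1, p.2.1)) = xs.zip ys := by
  induction xs with
  | nil => intro ys zs _; rfl
  | cons x t ih =>
    intro ys zs h
    cases ys with
    | nil => rfl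
    | cons y yt =>
      cases zs with
      | nil => simp at h
      | cons z zt =>
        simp only [List.zip_cons_cons, List.map_cons]
        refine congrArg _ ?_
        exact ih yt zt (by simpa using h)

-- A's result fold over the 3-way zip equals the fold over the 2-way zip (the carry column is never read)
lemma pvRes_drop3 (xs ys zs : List Int) (h : ys.length ≤ zs.length) (st : List Int × Int) :
    (xs.zip (ys.zip zs)).foldl pvResStep3 st = (xs.zip ys).foldl pvResStep st := by
  rw [← pvZip_proj xs ys zs h, List.foldl_map]
  rfl

lemma pvPad_len (u v : List Int) :
    (List.replicate (max u.length v.length - u.length) (0 : Int) ++ u).length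
      = max u.length v.length := by
  simp only [List.length_append, List.length_replicate]
  omega

lemma pvOut_eq (ad bd : List Int) (n : Nat) (sc : Bool)
    (h1 : ad.length = n) (h2 : bd.length = n) :
    pvOutA ad bd sc = pvOutB ad bd n sc := by
  unfold pvOutA pvOutB pvCarryA pvFin pvFinB
  set l := ad.reverse.zip bd.reverse with hl
  have hll : l.length = n := by
    simp [hl, List.length_zip, h1, h2]
  have hclen : (if sc then ((l.foldl pvCarStep (0, [])).2.reverse)
                 else List.replicate ad.length (0 : Int)).reverse.length
               = n := by
    cases sc <;> simp [pvCar_len, hll, h1]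
  have hres := pvRes_drop3 ad.reverse bd.reverse
      ((if sc then ((l.foldl pvCarStep (0, [])).2.reverse)
        else List.replicate ad.length (0 : Int)).reverse)
      (by rw [hclen]; simp [List.length_reverse, h2]) ([], 0)
  rw [hres, ← hl, pvB_decomp l [] [] 0]
  cases sc with
  | false => simp [h1]
  | true => simp

set_option maxHeartbeats 1000000 in
theorem pv_main (a b : Int) (sc : Bool) :
    add_step_by_step a b sc = add_step_by_step_alt a b sc := by
  have hA : add_step_by_step a b sc
      = pvOutA (List.replicate (max (pvDigits a).length (pvDigits b).length - (pvDigits a).length) (0 : Int) ++ pvDigits a)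
               (List.replicate (max (pvDigits a).length (pvDigits b).length - (pvDigits b).length) (0 : Int) ++ pvDigits b)
               sc := by
    unfold add_step_by_step align_numbers calculate_carry pvOutA pvCarryA pvFin
    rfl
  have hB : add_step_by_step_alt a b sc
      = pvOutB (List.replicate (max (pvDigits a).length (pvDigits b).length - (pvDigits a).length) (0 : Int) ++ pvDigits a)
               (List.replicate (max (pvDigits a).length (pvDigits b).length - (pvDigits b).length) (0 : Int) ++ pvDigits b)
               (max (pvDigits a).length (pvDigits b).length) sc := by
    unfold add_step_by_step_alt pvOutB pvFinB
    rfl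
  rw [hA, hB]
  refine pvOut_eq _ _ _ sc (pvPad_len _ _) ?_
  have := pvPad_len (pvDigits b) (pvDigits a)
  simpa [Nat.max_comm] using this

-- ===== VERDICT (by name: the statement is the Claim_ definition above) =====
theorem add_step_by_step_spec : Claim_equal_add_step_by_step := by
  intro a b sc _ _
  exact pv_main a b sc
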